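-- pv_equiv track=rewrite | github.com/Vestenar/PythonProjects | 02_Codesignal/02_The Core/111_gravitation.py | gravitation
-- ===== SOURCE A (Python) =====
-- def gravitation(rows):
--     motionless = []
--     vert = [[rows[j][i] for j in range(len(rows))] for i in range(len(rows[0]))]
--     dots = []
--     for i in range(len(vert)):
--         dots.append(vert[i][vert[i].index('#'):].count(".") if "#" in vert[i] else 0)
--     m = min(dots)
--     for i in range(len(dots)):
--         if dots[i] == m:
--             motionless.append(i)
--     return motionless
-- ===== SOURCE B (Python) =====
-- def _upd(s, c):
--     seen, cnt = s
--     if c == '#':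
--         return (True, cnt)
--     if c == '.' and seen:
--         return (seen, cnt + 1)
--     return s
--
--
-- def gravitation(rows):
--     w = len(rows[0])
--     state = [(False, 0)] * w
--     for row in rows:
--         state = [_upd(s, c) for s, c in zip(state, row)]
--     counts = [cnt for _, cnt in state]
--     m = min(counts)
--     return [i for i, cnt in enumerate(counts) if cnt == m]
-- ===== Notes on version B (the rewrite author's own statement) =====
-- stated objective: alternative
-- what changed: Replaces A's explicit transpose (building every column list, then slicing from the first '#' and counting dots) by a single top-to-bottom row pass that zips a per-column (seen,count) state over each row, so no column list, index() or slice is ever built.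
import Mathlib
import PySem

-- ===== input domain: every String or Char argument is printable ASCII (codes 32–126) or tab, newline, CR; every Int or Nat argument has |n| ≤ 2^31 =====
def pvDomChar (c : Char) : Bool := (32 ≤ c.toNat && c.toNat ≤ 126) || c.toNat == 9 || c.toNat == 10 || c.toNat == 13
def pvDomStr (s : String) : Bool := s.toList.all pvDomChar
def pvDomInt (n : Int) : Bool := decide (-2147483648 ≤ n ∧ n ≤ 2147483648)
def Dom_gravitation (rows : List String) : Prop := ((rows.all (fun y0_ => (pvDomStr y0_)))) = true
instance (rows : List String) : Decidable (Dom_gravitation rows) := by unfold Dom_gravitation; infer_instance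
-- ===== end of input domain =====

-- B replaces A's explicit column transpose (+ index/slice/count per column) by one top-to-bottom
-- row pass zipping a per-column (seen, count) state over each row; alternative decomposition, same cost.


-- ===== PORT A =====
-- indices rows[j], rows[j][i], dots[i] are in range under Pre_gravitation, so pyGetD defaults are never read
def gravitation (rows : List String) : List Int :=
  let vert : List (List Char) :=
    (PySem.List.pyRange 0 ((PySem.List.pyGetD rows 0 "").toList.length : Int) 1).map (fun i =>
      (PySem.List.pyRange 0 (rows.length : Int) 1).map (fun j =>
        PySem.List.pyGetD (PySem.List.pyGetD rows j "").toList i ' '))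
  let dots : List Int :=
    (PySem.List.pyRange 0 (vert.length : Int) 1).foldl (fun acc i =>
      acc ++ [if (PySem.List.pyGetD vert i []).contains '#'
              then ((PySem.List.slice (PySem.List.pyGetD vert i [])
                      (some (((PySem.List.index? (PySem.List.pyGetD vert i []) '#').getD 0 : Nat) : Int)) none).count '.' : Int)
              else 0]) []
  let m : Int := (PySem.List.min? dots (fun x => x)).getD 0
  (PySem.List.pyRange 0 (dots.length : Int) 1).foldl (fun acc i =>
    if PySem.List.pyGetD dots i 0 = m then acc ++ [i] else acc) []

-- ===== PORT B =====
def pvUpd (s : Bool × Int) (c : Char) : Bool × Int :=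
  if c = '#' then (true, s.2)
  else if c = '.' ∧ s.1 = true then (s.1, s.2 + 1)
  else s

def gravitation_alt (rows : List String) : List Int :=
  let w := (rows.headD "").toList.length
  let state := rows.foldl (fun st r => List.zipWith pvUpd st r.toList) (List.replicate w (false, (0 : Int)))
  let counts := state.map (fun s => s.2)
  let m : Int := (PySem.List.min? counts (fun x => x)).getD 0
  ((PySem.List.enumerate counts 0).filter (fun p => p.2 == m)).map (fun p => p.1)

-- ===== PRECONDITION & SPEC =====
-- Pre_ is exactly where Python A returns: rows nonempty (else rows[0] raises IndexError), first row
-- nonempty (else min([]) raises ValueError), every row at least as long as the first (else IndexError).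
def Pre_gravitation (rows : List String) : Prop :=
  rows ≠ [] ∧ 0 < (rows.headD "").toList.length ∧
    ∀ r ∈ rows, (rows.headD "").toList.length ≤ r.toList.length
instance (rows : List String) : Decidable (Pre_gravitation rows) := by
  unfold Pre_gravitation; infer_instance
def pvWitness_gravitation : List String := ["#.", ".."]

def Spec_gravitation (rows : List String) (out : List Int) : Prop := out = gravitation_alt rows
instance (rows : List String) (out : List Int) : Decidable (Spec_gravitation rows out) := by unfold Spec_gravitation; infer_instance

-- ===== CLAIM (what is proved, stated in full; the proofs are below) =====
def Claim_equal_gravitation : Prop := ∀ (rows : List String), Dom_gravitation rows → Pre_gravitation rows → Spec_gravitation rows (gravitation rows)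

-- ===== LEMMAS AND PROOFS =====

-- a list is the range-map of its getD values
theorem pv_list_eq_map_range {α : Type} (l : List α) (d : α) :
    l = (List.range l.length).map (fun i => l.getD i d) := by
  apply List.ext_getElem
  · simp
  · intro i h1 h2; simp [List.getD, List.getElem?_eq_getElem h1]

-- B's row fold over zipWith acts independently per column
theorem pv_fold_zipWith (rows : List (List Char)) :
    ∀ (st : List (Bool × Int)), (∀ r ∈ rows, st.length ≤ r.length) →
      rows.foldl (fun s r => List.zipWith pvUpd s r) st
        = (List.range st.length).map (fun i =>
            rows.foldl (fun s r => pvUpd s (r.getD i ' ')) (st.getD i (false, 0))) := by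
  induction rows with
  | nil => intro st _; simpa using pv_list_eq_map_range st (false, 0)
  | cons r rest ih =>
    intro st h
    have hr : st.length ≤ r.length := h r (by simp)
    have hlen : (List.zipWith pvUpd st r).length = st.length := by
      simp [List.length_zipWith]; omega
    have := ih (List.zipWith pvUpd st r) (by
      intro r' hr'; rw [hlen]; exact h r' (by simp [hr']))
    simp only [List.foldl_cons, this, hlen]
    apply List.map_congr_left
    intro i hi
    have hi' : i < st.length := List.mem_range.mp hi
    have : (List.zipWith pvUpd st r).getD i (false, 0) = pvUpd (st.getD i (false, 0)) (r.getD i ' ') := by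
      have h1 : i < r.length := lt_of_lt_of_le hi' hr
      simp [List.getD, hi', h1, hlen, List.getElem_zipWith]
    rw [this]

-- after the first '#', the fold just counts dots
theorem pv_fold_seen (cs : List Char) : ∀ (k : Int),
    (cs.foldl pvUpd (true, k)).2 = k + (cs.count '.' : Int) := by
  induction cs with
  | nil => intro k; simp
  | cons c cs ih =>
    intro k
    by_cases h1 : c = '#'
    · simp [pvUpd, h1, ih]
    · by_cases h2 : c = '.'
      · simp [pvUpd, h2, ih]; ring
      · simp [pvUpd, h1, h2, ih]

-- the per-column fold computes A's per-column expression
theorem pv_col_spec (col : List Char) :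
    (col.foldl pvUpd (false, 0)).2
      = if col.contains '#'
        then ((PySem.List.slice col (some (((PySem.List.index? col '#').getD 0 : Nat) : Int)) none).count '.' : Int)
        else 0 := by
  induction col with
  | nil => simp
  | cons c cs ih =>
    by_cases h1 : c = '#'
    · subst h1
      rw [PySem.List.index?_cons_self]
      simp only [List.foldl_cons, List.contains_cons, BEq.rfl, Bool.true_or, if_true]
      have : pvUpd (false, 0) '#' = (true, 0) := by simp [pvUpd]
      rw [this, pv_fold_seen]
      simp
    · have hdrop : pvUpd (false, 0) c = (false, 0) := by simp [pvUpd, h1]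
      simp only [List.foldl_cons, hdrop, ih]
      by_cases h2 : '#' ∈ cs
      · obtain ⟨k, hk⟩ := Option.isSome_iff_exists.mp ((PySem.List.index?_isSome_iff cs '#').mpr h2)
        rw [PySem.List.index?_cons_of_ne cs h1, hk]
        simp only [Option.map_some, Option.getD_some]
        have hc : (c :: cs).contains '#' = true := by simp [h2]
        have hc' : cs.contains '#' = true := by simp [h2]
        rw [if_pos hc', if_pos hc]
        rw [PySem.List.slice_from_natCast, PySem.List.slice_from_natCast]
        simp [List.drop_succ_cons]
      · have hne2 : ¬ '#' = c := fun h => h1 h.symm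
        simp [h2, hne2]

-- enumerate as a range map
theorem pv_enumerate_eq (L : List Int) : ∀ (s : Int),
    PySem.List.enumerate L s = (List.range L.length).map (fun i : Nat => (s + (i : Int), L.getD i 0)) := by
  induction L with
  | nil => intro s; simp [PySem.List.enumerate_nil]
  | cons x xs ih =>
    intro s
    rw [PySem.List.enumerate_cons, ih (s + 1)]
    simp [List.range_succ_eq_map, List.map_map, Function.comp]
    intro a _
    ring

-- zero-start corollary of pv_enumerate_eq
theorem pv_enumerate_zero (L : List Int) :
    PySem.List.enumerate L 0 = (List.range L.length).map (fun i : Nat => ((i : Int), L.getD i 0)) := by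
  rw [pv_enumerate_eq L 0]
  apply List.map_congr_left
  intro i _
  simp

-- A's index-selection loop equals B's enumerate/filter/map, over the same list and pivot
theorem pv_select_eq (L : List Int) (m : Int) :
    (PySem.List.pyRange 0 (L.length : Int) 1).foldl (fun acc i =>
        if PySem.List.pyGetD L i 0 = m then acc ++ [i] else acc) []
      = ((PySem.List.enumerate L 0).filter (fun p => p.2 == m)).map (fun p => p.1) := by
  rw [PySem.List.pyRange_zero_nat, List.foldl_map, pv_enumerate_zero L, List.filter_map, List.map_map]
  have hbody : (fun (acc : List Int) (i : Nat) => if PySem.List.pyGetD L (i : Int) 0 = m then acc ++ [(i : Int)] else acc)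
      = (fun acc i => if (fun i : Nat => L.getD i 0 == m) i = true then acc ++ [(fun i : Nat => (i : Int)) i] else acc) := by
    funext acc i
    simp only [PySem.List.pyGetD_natCast, beq_iff_eq]
  rw [hbody, PySem.List.foldl_append_if]
  simp only [List.nil_append]
  congr 1

set_option maxHeartbeats 1600000 in
theorem gravitation_eq (rows : List String) (hpre : Pre_gravitation rows) :
    gravitation rows = gravitation_alt rows := by
  obtain ⟨hne, hw, hlen⟩ := hpre
  unfold gravitation gravitation_alt
  simp only []
  set w := (rows.headD "").toList.length with hwdef
  have h0 : PySem.List.pyGetD rows 0 "" = rows.headD "" := by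
    cases rows with
    | nil => simp at hne
    | cons a l => simp [PySem.List.pyGetD_zero_cons]
  rw [h0]
  -- inner comprehension: [rows[j][i] for j in range(len(rows))] is the column map
  have hinner : ∀ (i : Int),
      (PySem.List.pyRange 0 (rows.length : Int) 1).map (fun j =>
        PySem.List.pyGetD (PySem.List.pyGetD rows j "").toList i ' ')
      = rows.map (fun r => PySem.List.pyGetD r.toList i ' ') := by
    intro i
    rw [show (fun j => PySem.List.pyGetD (PySem.List.pyGetD rows j "").toList i ' ')
        = (fun r : String => PySem.List.pyGetD r.toList i ' ') ∘ (fun j => PySem.List.pyGetD rows j "") from rfl,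
      ← List.map_map, PySem.List.map_pyGetD_pyRange_zero']
  simp only [hinner]
  have hvert : (PySem.List.pyRange 0 (w : Int) 1).map (fun i => rows.map (fun r => PySem.List.pyGetD r.toList i ' '))
      = (List.range w).map (fun i => rows.map (fun r => r.toList.getD i ' ')) := by
    rw [PySem.List.pyRange_zero_nat, List.map_map]
    apply List.map_congr_left
    intro i _
    simp [Function.comp, PySem.List.pyGetD_natCast]
  rw [hvert]
  -- A's dots loop = map of the per-column expression
  rw [PySem.List.foldl_pyRange_zero_pyGetD' ((List.range w).map (fun i => rows.map (fun r => r.toList.getD i ' '))) []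
        (fun acc col => acc ++ [if col.contains '#'
          then ((PySem.List.slice col (some (((PySem.List.index? col '#').getD 0 : Nat) : Int)) none).count '.' : Int)
          else 0]) []]
  rw [PySem.List.foldl_append_singleton_eq_map]
  simp only [List.nil_append, List.map_map]
  -- B's state fold = per-column folds
  have hstate :
      rows.foldl (fun st r => List.zipWith pvUpd st r.toList) (List.replicate w (false, (0 : Int)))
        = (List.range w).map (fun i =>
            (rows.map String.toList).foldl (fun s r => pvUpd s (r.getD i ' ')) (false, 0)) := by
    have h := pv_fold_zipWith (rows.map String.toList) (List.replicate w (false, (0 : Int)))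
      (by intro r hr
          simp only [List.mem_map] at hr
          obtain ⟨r', hr', rfl⟩ := hr
          simpa using hlen r' hr')
    rw [List.foldl_map] at h
    simpa using h
  rw [hstate]
  -- counts = dots, columnwise via pv_col_spec
  have hcounts :
      ((List.range w).map (fun i =>
          (rows.map String.toList).foldl (fun s r => pvUpd s (r.getD i ' ')) (false, 0))).map (fun s => s.2)
        = (List.range w).map ((fun col =>
            if col.contains '#'
            then ((PySem.List.slice col (some (((PySem.List.index? col '#').getD 0 : Nat) : Int)) none).count '.' : Int)
            else 0) ∘ fun i => rows.map (fun r => r.toList.getD i ' ')) := by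
    rw [List.map_map]
    apply List.map_congr_left
    intro i _
    show ((rows.map String.toList).foldl (fun s r => pvUpd s (r.getD i ' ')) (false, 0)).2 = _
    have h2 : (rows.map String.toList).foldl (fun s r => pvUpd s (r.getD i ' ')) (false, 0)
        = (rows.map (fun r : String => r.toList.getD i ' ')).foldl pvUpd (false, 0) := by
      rw [List.foldl_map, List.foldl_map]
    rw [h2, pv_col_spec]
    rfl
  rw [← hcounts]
  exact pv_select_eq _ _

-- ===== VERDICT (by name: the statement is the Claim_ definition above) =====
theorem gravitation_spec : Claim_equal_gravitation := by
  intro rows _ hpre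
  unfold Spec_gravitation
  exact gravitation_eq rows hpre
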